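-- pv_equiv track=rewrite | github.com/anhlt/mypyc-micropython | examples/list_operations.py | append_pop_cycle
-- ===== SOURCE A (Python) =====
-- def append_pop_cycle(n: int) -> int:
--     """Benchmark mixed append/pop - stack-like operations"""
--     lst: list = []
--     total: int = 0
--     for i in range(n):
--         lst.append(i)
--         if len(lst) > 10:
--             total += lst.pop()
--     # drain remaining
--     while len(lst) > 0:
--         total += lst.pop()
--     return total
-- ===== SOURCE B (Python) =====
-- def append_pop_cycle(n: int) -> int:
--     """Closed form: every i in range(n) is added to total exactly once, so total = n*(n-1)//2."""
--     return n * (n - 1) // 2 if n > 0 else 0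
-- ===== Notes on version B (the rewrite author's own statement) =====
-- stated objective: faster
-- what changed: Replaced the O(n) append/pop simulation (every appended integer ends up added to total exactly once) by the closed-form triangular-number formula.
import Mathlib
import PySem

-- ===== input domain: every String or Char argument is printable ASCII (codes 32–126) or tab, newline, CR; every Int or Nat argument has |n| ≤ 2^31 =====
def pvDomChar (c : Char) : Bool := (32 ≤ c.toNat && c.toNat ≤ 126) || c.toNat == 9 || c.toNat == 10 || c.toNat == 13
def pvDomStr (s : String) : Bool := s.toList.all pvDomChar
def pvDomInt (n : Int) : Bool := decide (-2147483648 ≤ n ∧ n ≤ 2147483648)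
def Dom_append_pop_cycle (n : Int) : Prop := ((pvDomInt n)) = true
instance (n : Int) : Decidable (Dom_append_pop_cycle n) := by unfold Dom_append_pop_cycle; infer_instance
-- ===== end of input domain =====

-- B replaces the O(n) append/pop simulation by the closed form n*(n-1)//2 (objective: faster).

-- ===== PORT A =====
-- one iteration of the `for i in range(n)` loop, state = (lst, total)
def apcStep (st : List Int × Int) (i : Int) : List Int × Int :=
  let lst := st.1 ++ [i]
  if lst.length > 10 then
    match PySem.List.pop? lst (-1) with
    | some (v, rest) => (rest, st.2 + v)
    | none => (lst, st.2)
  else (lst, st.2)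

-- the `while len(lst) > 0: total += lst.pop()` drain loop
def apcDrain (lst : List Int) (total : Int) : Int :=
  match h : PySem.List.pop? lst (-1) with
  | some (v, rest) => apcDrain rest (total + v)
  | none => total
termination_by lst.length
decreasing_by
  have h2 := PySem.List.length_of_pop?_eq_some lst h
  simp at h2 ⊢
  omega

def append_pop_cycle (n : Int) : Int :=
  let st := (PySem.List.pyRange 0 n 1).foldl apcStep ([], 0)
  apcDrain st.1 st.2

-- ===== PORT B =====
def append_pop_cycle_alt (n : Int) : Int :=
  if n > 0 then PySem.Int.floordiv (n * (n - 1)) 2 else 0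

-- ===== PRECONDITION & SPEC =====
def Spec_append_pop_cycle (n : Int) (out : Int) : Prop := out = append_pop_cycle_alt n
instance (n : Int) (out : Int) : Decidable (Spec_append_pop_cycle n out) := by unfold Spec_append_pop_cycle; infer_instance

-- ===== CLAIM (what is proved, stated in full; the proofs are below) =====
def Claim_equal_append_pop_cycle : Prop := ∀ (n : Int), Dom_append_pop_cycle n → Spec_append_pop_cycle n (append_pop_cycle n)

-- ===== LEMMAS AND PROOFS =====

theorem apcDrain_eq_sum (lst : List Int) (total : Int) :
    apcDrain lst total = total + lst.sum := by
  induction lst using List.reverseRecOn generalizing total with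
  | nil => rw [apcDrain]; split <;> simp_all [PySem.List.pop?, PySem.List.pyIdx?]
  | append_singleton ys y ih =>
      rw [apcDrain]
      split
      next v rest heq =>
        rw [PySem.List.pop?_last] at heq
        injection heq with heq
        injection heq with h1 h2
        subst h1; subst h2
        rw [ih]; simp; ring
      next heq =>
        rw [PySem.List.pop?_last] at heq
        exact absurd heq (by simp)

theorem apcStep_inv (st : List Int × Int) (i : Int) :
    (apcStep st i).2 + (apcStep st i).1.sum = st.2 + st.1.sum + i := by
  unfold apcStep
  simp only [PySem.List.pop?_last]
  split_ifs <;> simp <;> ring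

theorem apcFold_inv (l : List Int) (st : List Int × Int) :
    (l.foldl apcStep st).2 + (l.foldl apcStep st).1.sum = st.2 + st.1.sum + l.sum := by
  induction l generalizing st with
  | nil => simp
  | cons x xs ih =>
      simp only [List.foldl_cons, List.sum_cons]
      rw [ih, apcStep_inv]; ring

theorem twice_range_sum (m : Nat) :
    2 * (PySem.List.pyRange 0 (m : Int) 1).sum = (m : Int) * ((m : Int) - 1) := by
  induction m with
  | zero => simp [PySem.List.pyRange_one_eq_nil]
  | succ k ih =>
      push_cast
      rw [PySem.List.pyRange_one_succ_right (by positivity)]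
      push_cast at ih
      simp only [List.sum_append, List.sum_cons, List.sum_nil]
      nlinarith [ih]

-- ===== VERDICT (by name: the statement is the Claim_ definition above) =====
theorem append_pop_cycle_spec : Claim_equal_append_pop_cycle := by
  intro n _
  show append_pop_cycle n = append_pop_cycle_alt n
  unfold append_pop_cycle append_pop_cycle_alt
  have h := apcFold_inv (PySem.List.pyRange 0 n 1) ([], 0)
  rw [apcDrain_eq_sum]
  by_cases hn : n > 0
  · have hm : ((n.toNat : Int)) = n := Int.toNat_of_nonneg (le_of_lt hn)
    have hs := twice_range_sum n.toNat
    rw [hm] at hs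
    rw [if_pos hn, PySem.Int.floordiv_eq_ediv_of_pos (by norm_num)]
    simp at h
    omega
  · rw [if_neg hn, PySem.List.pyRange_one_eq_nil (by omega)] at *
    simp at h
    simp [h]
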